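-- pv_equiv track=rewrite | github.com/ssisk44/2023_NFL_ML_Projects | analysis/Single_Game_Outcome_Schedule_Data/versions/SGOSD_V1.py | getGamesBySeason
-- ===== SOURCE A (Python) =====
-- def getGamesBySeason(seasonsGamesArr, seasonYear):
--     seasonGames = []
--     for game in seasonsGamesArr:
--         if game[0] == seasonYear:
--             seasonGames.append(game)
--         if game[0] > seasonYear:
--             break
--     return seasonGames
-- ===== SOURCE B (Python) =====
-- def getGamesBySeason(seasonsGamesArr, seasonYear):
--     i = 0
--     while i < len(seasonsGamesArr) and seasonsGamesArr[i][0] <= seasonYear: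
--         i += 1
--     return [g for g in seasonsGamesArr[:i] if g[0] == seasonYear]
-- ===== Notes on version B (the rewrite author's own statement) =====
-- stated objective: alternative
-- what changed: Replaces A's element-wise append-and-break loop by an index-based while loop that only advances a counter to the stop position, followed by an equality filter over the slice up to that index.
import Mathlib
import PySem

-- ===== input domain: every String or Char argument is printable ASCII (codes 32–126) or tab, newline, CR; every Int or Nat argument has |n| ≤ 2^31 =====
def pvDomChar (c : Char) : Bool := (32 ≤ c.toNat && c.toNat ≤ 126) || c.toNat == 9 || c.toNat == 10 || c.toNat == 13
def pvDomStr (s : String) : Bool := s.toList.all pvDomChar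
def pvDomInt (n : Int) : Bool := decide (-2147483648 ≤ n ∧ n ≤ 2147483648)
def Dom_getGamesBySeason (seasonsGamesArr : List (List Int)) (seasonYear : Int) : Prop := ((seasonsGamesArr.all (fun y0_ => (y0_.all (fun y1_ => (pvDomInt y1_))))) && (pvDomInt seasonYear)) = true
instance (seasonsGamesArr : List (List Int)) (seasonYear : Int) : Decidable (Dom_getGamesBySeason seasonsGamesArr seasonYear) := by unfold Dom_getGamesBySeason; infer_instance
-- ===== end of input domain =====

-- B replaces A's append-and-break element loop by an index-based while loop locating the
-- stop index, then filters the slice up to it; same cost, different structure ("alternative").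


-- ===== PORT A =====
-- loop over the games: append on game[0] == seasonYear, break after a game with game[0] > seasonYear
def getGamesBySeasonGo (games : List (List Int)) (seasonYear : Int) : List (List Int) :=
  match games with
  | [] => []
  | game :: rest =>
    match PySem.List.pyGet? game 0 with
    | none => []  -- game[0] raises IndexError in Python; excluded by Pre_
    | some h =>
      let appended := if h = seasonYear then [game] else []
      if h > seasonYear then appended
      else appended ++ getGamesBySeasonGo rest seasonYear

def getGamesBySeason (seasonsGamesArr : List (List Int)) (seasonYear : Int) : List (List Int) :=
  getGamesBySeasonGo seasonsGamesArr seasonYear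

-- ===== PORT B =====
-- while i < len(arr) and arr[i][0] <= seasonYear: i += 1
def getGamesBySeasonIdx (arr : List (List Int)) (seasonYear : Int) (i : Nat) : Nat :=
  if hi : i < arr.length then
    match PySem.List.pyGet? arr[i] 0 with
    | none => i  -- arr[i][0] raises IndexError in Python; excluded by Pre_
    | some h => if h ≤ seasonYear then getGamesBySeasonIdx arr seasonYear (i + 1) else i
  else i
termination_by arr.length - i

-- return [g for g in arr[:i] if g[0] == seasonYear]
def getGamesBySeason_alt (seasonsGamesArr : List (List Int)) (seasonYear : Int) : List (List Int) :=
  (PySem.List.slice seasonsGamesArr none (some ((getGamesBySeasonIdx seasonsGamesArr seasonYear 0 : Nat) : Int))).filter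
    (fun g => (PySem.List.pyGet? g 0).getD 0 == seasonYear)

-- ===== PRECONDITION & SPEC =====
-- A raises IndexError iff its scan (which stops just after the first game whose head exceeds
-- seasonYear) reaches an empty game; Pre_ excludes exactly those inputs.
def Pre_getGamesBySeason (seasonsGamesArr : List (List Int)) (seasonYear : Int) : Prop :=
  ∀ i, i < seasonsGamesArr.length →
    (∀ j, j < i → ((seasonsGamesArr.getD j []).head?.any (fun h => h ≤ seasonYear)) = true) →
    seasonsGamesArr.getD i [] ≠ []
instance (seasonsGamesArr : List (List Int)) (seasonYear : Int) : Decidable (Pre_getGamesBySeason seasonsGamesArr seasonYear) := by unfold Pre_getGamesBySeason; infer_instance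

def pvWitness_getGamesBySeason : List (List Int) × Int := ([[2022, 1], [2023, 5], [2023, 7], [2024, 2]], 2023)

def Spec_getGamesBySeason (seasonsGamesArr : List (List Int)) (seasonYear : Int) (out : List (List Int)) : Prop := out = getGamesBySeason_alt seasonsGamesArr seasonYear
instance (seasonsGamesArr : List (List Int)) (seasonYear : Int) (out : List (List Int)) : Decidable (Spec_getGamesBySeason seasonsGamesArr seasonYear out) := by unfold Spec_getGamesBySeason; infer_instance

-- ===== CLAIM (what is proved, stated in full; the proofs are below) =====
def Claim_equal_getGamesBySeason : Prop := ∀ (seasonsGamesArr : List (List Int)) (seasonYear : Int), Dom_getGamesBySeason seasonsGamesArr seasonYear → Pre_getGamesBySeason seasonsGamesArr seasonYear → Spec_getGamesBySeason seasonsGamesArr seasonYear (getGamesBySeason seasonsGamesArr seasonYear)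

-- ===== LEMMAS AND PROOFS =====
-- shifting the start index of the while loop past a cons
theorem getGamesBySeasonIdx_cons_succ (g : List Int) (rest : List (List Int)) (y : Int) (i : Nat) :
    getGamesBySeasonIdx (g :: rest) y (i + 1) = getGamesBySeasonIdx rest y i + 1 := by
  fun_induction getGamesBySeasonIdx rest y i with
  | case1 i' hi hget =>
      rw [getGamesBySeasonIdx]
      simp only [List.length_cons, Nat.add_lt_add_iff_right, hi, dif_pos]
      simp only [List.getElem_cons_succ, hget]
  | case2 i' hi h hget hle ih =>
      rw [getGamesBySeasonIdx]
      simp only [List.length_cons, Nat.add_lt_add_iff_right, hi, dif_pos]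
      simp only [List.getElem_cons_succ, hget, hle, if_pos, ih]
  | case3 i' hi h hget hle =>
      rw [getGamesBySeasonIdx]
      simp only [List.length_cons, Nat.add_lt_add_iff_right, hi, dif_pos]
      simp [List.getElem_cons_succ, hget, hle]
  | case4 i' hi =>
      rw [getGamesBySeasonIdx]
      simp [List.length_cons, Nat.add_lt_add_iff_right, hi]

theorem getGamesBySeasonGo_eq_alt (games : List (List Int)) (y : Int) :
    getGamesBySeasonGo games y = getGamesBySeason_alt games y := by
  induction games with
  | nil => simp [getGamesBySeasonGo, getGamesBySeason_alt, getGamesBySeasonIdx, PySem.List.slice]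
  | cons game rest ih =>
    simp only [getGamesBySeasonGo, getGamesBySeason_alt]
    rw [getGamesBySeasonIdx]
    simp only [List.length_cons, Nat.zero_lt_succ, dif_pos, List.getElem_cons_zero]
    cases hg : PySem.List.pyGet? game 0 with
    | none => dsimp only; simp [PySem.List.slice]
    | some h =>
      dsimp only
      by_cases hle : h ≤ y
      · have hngt : ¬ h > y := by omega
        rw [if_pos hle, getGamesBySeasonIdx_cons_succ]
        have hcast : ((((getGamesBySeasonIdx rest y 0) + 1 : Nat)) : Int)
            = ((getGamesBySeasonIdx rest y 0 : Nat) : Int) + (1 : Nat) := by push_cast; ring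
        simp only [hngt, if_false, hcast]
        rw [show ((getGamesBySeasonIdx rest y 0 : Nat) : Int) + ((1 : Nat) : Int)
              = (((getGamesBySeasonIdx rest y 0 + 1 : Nat)) : Int) by push_cast; ring]
        rw [PySem.List.slice_to_natCast, List.take_succ_cons, List.filter_cons]
        simp only [hg, Option.getD_some]
        by_cases heq : h = y
        · simp only [heq, BEq.rfl, if_pos, ite_true]
          rw [ih, getGamesBySeason_alt, PySem.List.slice_to_natCast]
          simp
        · have hb : (h == y) = false := by simp [heq]
          simp only [heq, if_false, hb, ih, getGamesBySeason_alt, PySem.List.slice_to_natCast]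
          simp
      · have hgt : h > y := by omega
        have hne : ¬ h = y := by omega
        rw [if_neg hle]
        simp only [hgt, if_true, hne, if_false]
        rw [show (((0 : Nat)) : Int) = ((0 : Nat) : Int) from rfl, PySem.List.slice_to_natCast]
        simp

-- ===== VERDICT (by name: the statement is the Claim_ definition above) =====
theorem getGamesBySeason_spec : Claim_equal_getGamesBySeason := by
  intro arr y _ _
  exact getGamesBySeasonGo_eq_alt arr y
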